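-- pv_equiv track=rewrite | github.com/eddiego28/wamp-extractor-pro-pyqt5 | src/core/utils.py | largest_json_in_text
-- ===== SOURCE A (Python) =====
-- from typing import Optional
--
-- def largest_json_in_text(s: str) -> Optional[str]:
--     """Devuelve el objeto JSON balanceado más largo dentro de s."""
--     if not s:
--         return None
--     best = None
--     best_len = 0
--     n = len(s)
--     i = 0
--     while i < n:
--         start = s.find("{", i)
--         if start < 0: break
--         depth = 0; j = start
--         while j < n:
--             ch = s[j]
--             if ch == "{":
--                 depth += 1
--             elif ch == "}":
--                 depth -= 1
--                 if depth == 0: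
--                     ln = j - start + 1
--                     if ln > best_len:
--                         best_len = ln
--                         best = s[start:start+ln]
--                     j += 1
--                     break
--             j += 1
--         i = max(j, start+1)
--     return best
-- ===== SOURCE B (Python) =====
-- from typing import Optional
--
-- def largest_json_in_text(s: str) -> Optional[str]:
--     """Single pass with a stack of indices of unmatched opening braces."""
--     best = None
--     stack = []
--     for j, ch in enumerate(s):
--         if ch == "{":
--             stack.append(j)
--         elif ch == "}":
--             if stack:
--                 b = stack.pop()
--                 if not stack:
--                     if best is None or j - b + 1 > len(best):
--                         best = s[b:j + 1]
--     return best
-- ===== Notes on version B (the rewrite author's own statement) =====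
-- stated objective: simpler
-- what changed: Replaced the outer brace-find/inner depth-counting loop with index jumping by one flat enumerate pass maintaining a stack of indices of unmatched opening braces, recording a candidate exactly when the stack empties.
import Mathlib
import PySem

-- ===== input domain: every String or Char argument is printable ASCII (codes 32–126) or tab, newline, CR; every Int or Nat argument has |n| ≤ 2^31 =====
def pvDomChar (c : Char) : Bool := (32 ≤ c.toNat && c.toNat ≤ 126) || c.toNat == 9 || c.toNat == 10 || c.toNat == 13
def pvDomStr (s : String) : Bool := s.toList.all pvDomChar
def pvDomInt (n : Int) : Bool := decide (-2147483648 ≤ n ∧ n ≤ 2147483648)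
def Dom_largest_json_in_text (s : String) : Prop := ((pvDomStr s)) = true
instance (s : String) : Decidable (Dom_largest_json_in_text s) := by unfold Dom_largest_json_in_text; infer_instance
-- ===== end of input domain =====

-- B replaces A's outer find/inner depth loop by one flat stack-of-indices pass (objective: simpler).

-- ===== PORT A =====
-- inner 'while j < n' loop of A: returns (some j if depth hit 0 at j, final j after the loop/break)
def pvAInner (l : List Char) (j : Nat) (depth : Int) : Option Nat × Nat :=
  if h : j < l.length then
    let ch := l[j]
    if ch = '{' then pvAInner l (j + 1) (depth + 1)
    else if ch = '}' then
      if depth - 1 = 0 then (some j, j + 1)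
      else pvAInner l (j + 1) (depth - 1)
    else pvAInner l (j + 1) depth
  else (none, j)
termination_by l.length - j

def pvAOuter (l : List Char) (fuel : Nat) (i : Nat) (best : Option (List Char))
    (best_len : Int) : Option (List Char) :=
  match fuel with          -- fuel ≥ iterations of the while-loop; a pure totality guard
  | 0 => best
  | fuel + 1 =>
    if l.length ≤ i then best
    else
      let start := PySem.Chars.findFrom l ['{'] (i : Int)
      if start < 0 then best
      else
        let r := pvAInner l start.toNat 0
        match r.1 with
        | some c =>
          let ln : Int := (c : Int) - start + 1
          if ln > best_len then
            pvAOuter l fuel (max r.2 (start.toNat + 1))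
              (some (PySem.List.slice l (some start) (some (start + ln)))) ln
          else pvAOuter l fuel (max r.2 (start.toNat + 1)) best best_len
        | none => pvAOuter l fuel (max r.2 (start.toNat + 1)) best best_len

def largest_json_in_text (s : String) : Option String :=
  let l := s.toList
  if l.length = 0 then none
  else (pvAOuter l (l.length + 1) 0 none 0).map String.ofList

-- ===== PORT B =====
-- 'if best is None or ln > len(best): best = s[b:j+1]'
def pvRecord (l : List Char) (b j : Int) (best : Option (List Char)) : Option (List Char) :=
  match best with
  | none => some (PySem.List.slice l (some b) (some (j + 1)))
  | some bs =>
      if j - b + 1 > (bs.length : Int) then some (PySem.List.slice l (some b) (some (j + 1)))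
      else some bs

-- loop body of B's single enumerate pass
def pvBStep (l : List Char) (acc : List Int × Option (List Char)) (jc : Int × Char) :
    List Int × Option (List Char) :=
  let (stack, best) := acc
  let (j, ch) := jc
  if ch = '{' then (j :: stack, best)
  else if ch = '}' then
    match stack with
    | [] => (stack, best)
    | b :: rest => (rest, if rest = [] then pvRecord l b j best else best)
  else (stack, best)

def largest_json_in_text_alt (s : String) : Option String :=
  let l := s.toList
  ((PySem.List.enumerate l).foldl (pvBStep l) ([], none)).2.map String.ofList

-- ===== PRECONDITION & SPEC =====
def Spec_largest_json_in_text (s : String) (out : Option String) : Prop := out = largest_json_in_text_alt s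
instance (s : String) (out : Option String) : Decidable (Spec_largest_json_in_text s out) := by unfold Spec_largest_json_in_text; infer_instance

-- ===== CLAIM (what is proved, stated in full; the proofs are below) =====
def Claim_equal_largest_json_in_text : Prop := ∀ (s : String), Dom_largest_json_in_text s → Spec_largest_json_in_text s (largest_json_in_text s)

-- ===== LEMMAS AND PROOFS =====

theorem pvAInner_facts (l : List Char) (j : Nat) (d : Int) (hj : j ≤ l.length) :
    (pvAInner l j d).2 ≤ l.length ∧
    (∀ c, (pvAInner l j d).1 = some c → j ≤ c ∧ c < l.length ∧ (pvAInner l j d).2 = c + 1) ∧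
    ((pvAInner l j d).1 = none → (pvAInner l j d).2 = l.length) := by
  induction j, d using pvAInner.induct l with
  | case1 j d h ch hch ih =>
    rw [pvAInner]
    simp only [dif_pos h]
    rw [if_pos hch]
    have := ih (by omega)
    refine ⟨this.1, fun c hc => ?_, this.2.2⟩
    have := this.2.1 c hc
    exact ⟨by omega, this.2.1, this.2.2⟩
  | case2 j d h ch hch hch2 hd =>
    rw [pvAInner]
    simp only [dif_pos h]
    rw [if_neg hch, if_pos hch2, if_pos hd]
    exact ⟨by omega, fun c hc => by simp at hc; omega, by simp⟩
  | case3 j d h ch hch hch2 hd ih =>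
    rw [pvAInner]
    simp only [dif_pos h]
    rw [if_neg hch, if_pos hch2, if_neg hd]
    have := ih (by omega)
    refine ⟨this.1, fun c hc => ?_, this.2.2⟩
    have := this.2.1 c hc
    exact ⟨by omega, this.2.1, this.2.2⟩
  | case4 j d h ch hch hch2 ih =>
    rw [pvAInner]
    simp only [dif_pos h]
    rw [if_neg hch, if_neg hch2]
    have := ih (by omega)
    refine ⟨this.1, fun c hc => ?_, this.2.2⟩
    have := this.2.1 c hc
    exact ⟨by omega, this.2.1, this.2.2⟩
  | case5 j d h =>
    rw [pvAInner]
    simp only [dif_neg h]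
    exact ⟨by omega, fun c hc => by simp at hc, by omega⟩


-- outer 'while i < n' loop of A (best_len kept as Python int)
-- B's fold, rephrased as a structural loop with a Nat position and Nat stack entries
def pvBLoop (l : List Char) (j : Nat) (cs : List Char) (st : List Nat)
    (best : Option (List Char)) : Option (List Char) :=
  match cs with
  | [] => best
  | ch :: cs' =>
    if ch = '{' then pvBLoop l (j + 1) cs' (j :: st) best
    else if ch = '}' then
      match st with
      | [] => pvBLoop l (j + 1) cs' [] best
      | b :: rest =>
          pvBLoop l (j + 1) cs' rest
            (if rest = [] then pvRecord l (b : Int) (j : Int) best else best)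
    else pvBLoop l (j + 1) cs' st best

theorem pvB_fold_eq_loop (l cs : List Char) (j : Nat) (st : List Nat) (best : Option (List Char)) :
    ((PySem.List.enumerate cs (j : Int)).foldl (pvBStep l) (st.map (fun n => Int.ofNat n), best)).2
      = pvBLoop l j cs st best := by
  induction cs generalizing j st best with
  | nil => simp [PySem.List.enumerate, pvBLoop]
  | cons ch cs' ih =>
    have he : PySem.List.enumerate (ch :: cs') (j : Int)
        = ((j : Int), ch) :: PySem.List.enumerate cs' ((j : Int) + 1) := rfl
    rw [he, List.foldl_cons]
    by_cases h1 : ch = '{'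
    · simp only [pvBStep, pvBLoop, if_pos h1]
      have := ih (j + 1) (j :: st) best
      push_cast at this ⊢
      exact this
    · by_cases h2 : ch = '}'
      · cases st with
        | nil =>
          simp only [pvBStep, pvBLoop, if_neg h1, if_pos h2, List.map_nil]
          have := ih (j + 1) [] best
          push_cast at this ⊢
          exact this
        | cons b rest =>
          simp only [pvBStep, pvBLoop, if_neg h1, if_pos h2, List.map_cons]
          have hre : (List.map (fun n => Int.ofNat n) rest = []) = (rest = []) := by
            simp
          simp only [hre]
          have := ih (j + 1) rest (if rest = [] then pvRecord l (b : Int) (j : Int) best else best)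
          push_cast at this ⊢
          split_ifs with hr <;> [skip; skip] <;> {
            first
            | (rw [if_pos hr] at this; exact this)
            | (rw [if_neg hr] at this; exact this) }
      · simp only [pvBStep, pvBLoop, if_neg h1, if_neg h2]
        have := ih (j + 1) st best
        push_cast at this ⊢
        exact this

-- a '{'-free region with an empty stack is skipped
theorem pvBLoop_skip (l : List Char) (cs rest : List Char) (j : Nat) (best : Option (List Char))
    (h : '{' ∉ cs) :
    pvBLoop l j (cs ++ rest) [] best = pvBLoop l (j + cs.length) rest [] best := by
  induction cs generalizing j with
  | nil => simp
  | cons ch cs' ih =>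
    have h1 : ch ≠ '{' := by simp at h; exact Ne.symm h.1
    have h' : '{' ∉ cs' := by simp at h; exact h.2
    rw [List.cons_append]
    by_cases h2 : ch = '}'
    · simp only [pvBLoop, if_neg h1, if_pos h2]
      rw [ih (j + 1) h']
      congr 1
      simp; omega
    · simp only [pvBLoop, if_neg h1, if_neg h2]
      rw [ih (j + 1) h']
      congr 1
      simp; omega

-- inner correspondence: stack bottom b₀, depth = stack length
theorem pvBLoop_inner (l : List Char) (j : Nat) (st : List Nat) (b₀ : Nat)
    (best : Option (List Char)) (hj : j ≤ l.length) :
    pvBLoop l j (l.drop j) (st ++ [b₀]) best =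
      (match (pvAInner l j ((st.length + 1 : Nat) : Int)).1 with
       | some c => pvBLoop l (c + 1) (l.drop (c + 1)) [] (pvRecord l (b₀ : Int) (c : Int) best)
       | none => best) := by
  induction hn : l.length - j generalizing j st best with
  | zero =>
    have hjn : j = l.length := by omega
    rw [pvAInner]
    simp [hjn, pvBLoop]
  | succ k ih =>
    have hjlt : j < l.length := by omega
    have hd : l.drop j = l[j] :: l.drop (j + 1) := List.drop_eq_getElem_cons hjlt
    rw [hd, pvAInner]
    simp only [dif_pos hjlt]
    by_cases h1 : l[j] = '{'
    · simp only [pvBLoop, if_pos h1]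
      rw [show (j : Nat) :: (st ++ [b₀]) = (j :: st) ++ [b₀] from rfl]
      rw [ih (j + 1) (j :: st) best (by omega) (by omega)]
      have hlen : (((j :: st).length + 1 : Nat) : Int) = ((st.length + 1 : Nat) : Int) + 1 := by
        simp only [List.length_cons]; push_cast; omega
      rw [hlen]
    · by_cases h2 : l[j] = '}'
      · cases st with
        | nil =>
          simp only [pvBLoop, if_neg h1, if_pos h2, List.nil_append]
          have hz : ((([] : List Nat).length + 1 : Nat) : Int) - 1 = 0 := by norm_num
          rw [if_pos hz]
          simp
        | cons b st' =>
          simp only [pvBLoop, if_neg h1, if_pos h2, List.cons_append]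
          have hne : st' ++ [b₀] ≠ [] := by simp
          rw [if_neg hne]
          have hnz : (((b :: st').length + 1 : Nat) : Int) - 1 ≠ 0 := by simp only [List.length_cons]; push_cast; omega
          rw [if_neg hnz]
          rw [ih (j + 1) st' best (by omega) (by omega)]
          have hlen : (((b :: st').length + 1 : Nat) : Int) - 1 = ((st'.length + 1 : Nat) : Int) := by
            simp only [List.length_cons]; push_cast; omega
          rw [hlen]
      · simp only [pvBLoop, if_neg h1, if_neg h2]
        rw [ih (j + 1) st best (by omega) (by omega)]


def pvInv (best : Option (List Char)) (bl : Int) : Prop :=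
  (best = none ∧ bl = 0) ∨ (∃ bs, best = some bs ∧ bl = (bs.length : Int))

-- a '{'-free list is passed through by pvBLoop with an empty stack
theorem pvBLoop_nobrace (l : List Char) (cs : List Char) (j : Nat) (best : Option (List Char))
    (h : '{' ∉ cs) : pvBLoop l j cs [] best = best := by
  have := pvBLoop_skip l cs [] j best h
  simpa using this

theorem pvOuter_eq (l : List Char) (fuel i : Nat) (best : Option (List Char)) (bl : Int)
    (hi : i ≤ l.length) (hfuel : l.length + 1 - i ≤ fuel) (hinv : pvInv best bl) :
    pvBLoop l i (l.drop i) [] best = pvAOuter l fuel i best bl := by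
  induction fuel generalizing i best bl with
  | zero => omega
  | succ fuel ih =>
  by_cases hin : l.length ≤ i
  · have hieq : i = l.length := by omega
    simp only [pvAOuter, if_pos hin]
    rw [hieq, List.drop_length]
    rfl
  · by_cases hs : PySem.Chars.findFrom l ['{'] (i : Int) < 0
    · simp only [pvAOuter, if_neg hin, if_pos hs]
      have hm1 : PySem.Chars.findFrom l ['{'] (i : Int) = -1 := by
        rw [PySem.Chars.findFrom_natCast l ['{'] i hi] at hs ⊢
        split_ifs with hf
        · rfl
        · exfalso
          have := PySem.Chars.neg_one_le_find (l.drop i) ['{']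
          rw [if_neg hf] at hs
          omega
      have hnob : ¬ ['{'] <:+: l.drop i :=
        (PySem.Chars.findFrom_natCast_eq_neg_one_iff l ['{'] i hi).mp hm1
      have hno : '{' ∉ l.drop i := fun hmem => hnob ((List.singleton_infix_iff '{' _).mpr hmem)
      exact pvBLoop_nobrace l _ i best hno
    · have hspec := PySem.Chars.findFrom_natCast_spec l ['{'] i hi (by omega)
      set start := PySem.Chars.findFrom l ['{'] (i : Int) with hstart
      set st := start.toNat with hst
      have hstart_lt : st < l.length := by
        rcases hspec.2.1 with ⟨t, ht⟩
        have := congrArg List.length ht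
        simp at this; omega
      have hi_le : i ≤ st := by omega
      have hchar : l[st]'hstart_lt = '{' := by
        rcases hspec.2.1 with ⟨t, ht⟩
        have hd : l.drop st = '{' :: t := ht.symm
        have : (l.drop st)[0]'(by rw [hd]; simp) = '{' := by simp [hd]
        rwa [List.getElem_drop] at this
      have hfacts0 := pvAInner_facts l st 0 (le_of_lt hstart_lt)
      have hr2le : (pvAInner l st 0).2 ≤ l.length := hfacts0.1
      -- B: skip the '{'-free stretch between i and st, consume the '{', enter the inner lemma
      have hsplit : l.drop i = (l.drop i).take (st - i) ++ l.drop st := by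
        conv_lhs => rw [← List.take_append_drop (st - i) (l.drop i)]
        rw [List.drop_drop]
        congr 2
        omega
      have hnotake : '{' ∉ (l.drop i).take (st - i) := by
        intro hmem
        rcases List.mem_iff_getElem.mp hmem with ⟨k, hk, hkeq⟩
        rw [List.length_take] at hk
        have hkd : k < (l.drop i).length := by omega
        have hklt : k < st - i := by omega
        have h1 : (l.drop i)[k]'hkd = '{' := by
          rw [List.getElem_take] at hkeq; exact hkeq
        have hikl : i + k < l.length := by simp at hkd; omega
        have h1' : l[i + k]'hikl = '{' := by
          rw [List.getElem_drop] at h1; exact h1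
        apply hspec.2.2 (i + k) (by omega) (by omega)
        refine ⟨l.drop (i + k + 1), ?_⟩
        have hdik : l.drop (i + k) = l[i + k]'hikl :: l.drop (i + k + 1) :=
          List.drop_eq_getElem_cons hikl
        rw [hdik, h1']
        rfl
      have hdst : l.drop st = l[st]'hstart_lt :: l.drop (st + 1) := List.drop_eq_getElem_cons hstart_lt
      have hBchain : pvBLoop l i (l.drop i) [] best
          = pvBLoop l (st + 1) (l.drop (st + 1)) ([] ++ [st]) best := by
        rw [hsplit, pvBLoop_skip l _ _ i best hnotake]
        have hlen_take : ((l.drop i).take (st - i)).length = st - i := by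
          rw [List.length_take]
          simp; omega
        rw [hlen_take, show i + (st - i) = st by omega]
        rw [hdst, hchar]
        simp [pvBLoop]
      rw [hBchain, pvBLoop_inner l (st + 1) [] st best (by omega)]
      have hA : pvAInner l st 0 = pvAInner l (st + 1) ((([] : List Nat).length + 1 : Nat) : Int) := by
        rw [pvAInner]
        simp only [dif_pos hstart_lt, if_pos hchar]
        norm_num
      rw [← hA]
      have hs' : ¬ PySem.Chars.findFrom l ['{'] (i : Int) < 0 := by rw [← hstart]; exact hs
      simp only [pvAOuter, if_neg hin, if_neg hs']
      rw [← hstart, ← hst]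
      rcases hAi : (pvAInner l st 0).1 with _ | c
      · -- never closed: both sides return best
        have hend := hfacts0.2.2 hAi
        show best = pvAOuter l fuel (max (pvAInner l st 0).2 (st + 1)) best bl
        have hmax : max (pvAInner l st 0).2 (st + 1) = l.length := by omega
        rw [hmax, ← ih l.length best bl (le_refl _) (by omega) hinv, List.drop_length]
        rfl
      · -- closed at c
        have hc := hfacts0.2.1 c hAi
        have hc1 : st ≤ c := hc.1
        have hc2 : c < l.length := hc.2.1
        have hc3 : (pvAInner l st 0).2 = c + 1 := hc.2.2
        have hmax : max (pvAInner l st 0).2 (st + 1) = c + 1 := by omega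
        have hstcast : start = (st : Int) := by omega
        have harith : start + ((c : Int) - start + 1) = (c : Int) + 1 := by ring
        have hln_pos : (0 : Int) < (c : Int) - start + 1 := by
          rw [hstcast]; omega
        have hslice_len :
            (PySem.List.slice l (some (st : Int)) (some ((c : Int) + 1))).length = c + 1 - st := by
          have hcast : ((c : Int) + 1) = ((c + 1 : Nat) : Int) := by omega
          rw [hcast, PySem.List.slice_natCast l st (c + 1), List.length_take]
          simp; omega
        have hrec : pvRecord l (st : Int) (c : Int) best
            = (if ((c : Int) - start + 1) > bl
               then some (PySem.List.slice l (some start) (some (start + ((c : Int) - start + 1))))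
               else best) := by
          rw [harith, hstcast]
          rcases hinv with ⟨hb, hbl⟩ | ⟨bs, hb, hbl⟩
          · subst hb; subst hbl
            rw [if_pos (by omega)]
            simp [pvRecord]
          · subst hb; subst hbl
            simp only [pvRecord]
        show pvBLoop l (c + 1) (l.drop (c + 1)) [] (pvRecord l (st : Int) (c : Int) best)
            = (if ((c : Int) - start + 1) > bl
               then pvAOuter l fuel (max (pvAInner l st 0).2 (st + 1))
                 (some (PySem.List.slice l (some start) (some (start + ((c : Int) - start + 1)))))
                 ((c : Int) - start + 1)
               else pvAOuter l fuel (max (pvAInner l st 0).2 (st + 1)) best bl)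
        rw [hrec, hmax]
        by_cases hln : ((c : Int) - start + 1) > bl
        · rw [if_pos hln, if_pos hln]
          apply ih (c + 1) _ _ (by omega) (by omega) ?_
          right
          refine ⟨_, rfl, ?_⟩
          rw [harith, hstcast, hslice_len]
          omega
        · rw [if_neg hln, if_neg hln]
          exact ih (c + 1) best bl (by omega) (by omega) hinv

-- ===== VERDICT (by name: the statement is the Claim_ definition above) =====
theorem largest_json_in_text_spec : Claim_equal_largest_json_in_text := by
  intro s _
  unfold Spec_largest_json_in_text
  simp only [largest_json_in_text, largest_json_in_text_alt]
  have hb := pvB_fold_eq_loop s.toList s.toList 0 [] none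
  simp only [List.map_nil, Nat.cast_zero] at hb
  by_cases h0 : s.toList.length = 0
  · have hnil : s.toList = [] := List.length_eq_zero_iff.mp h0
    rw [if_pos h0, hnil]
    rfl
  · rw [if_neg h0]
    have ho := pvOuter_eq s.toList (s.toList.length + 1) 0 none 0 (by omega) (by omega) (Or.inl ⟨rfl, rfl⟩)
    rw [List.drop_zero] at ho
    rw [← ho, ← hb]
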